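-- pv_equiv track=rewrite | github.com/Aakashbansal837/python | Balanced Sequence (world code sprint 13).py | fewestOperationsToBalance
-- ===== SOURCE A (Python) =====
-- def fewestOperationsToBalance(s):
--     t = []
--     for c in s:
--         if len(t) == 0 or t[-1] + c != '()': t += c
--         else: del t[-1]
--
--     a = t.count('(')
--     b = t.count(')')
--
--     return min(a, 1) + min(b, 1)
-- ===== SOURCE B (Python) =====
-- def fewestOperationsToBalance(s):
--     has_open = False
--     has_close = False
--     open_cnt = 0
--     for c in s:
--         if c == '(':
--             open_cnt += 1
--         elif c == ')':
--             if open_cnt > 0: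
--                 open_cnt -= 1
--             else:
--                 has_close = True
--         else:
--             if open_cnt > 0:
--                 has_open = True
--             open_cnt = 0
--     return (1 if has_open or open_cnt > 0 else 0) + (1 if has_close else 0)
-- ===== Notes on version B (the rewrite author's own statement) =====
-- stated objective: faster
-- what changed: Replaces A's explicit stack of characters (built, popped, then scanned twice with count) by a single pass keeping only O(1) state: a counter of pending open brackets, reset at every non-bracket blocker, plus two flags recording whether any unmatched open or close bracket survives.
import Mathlib
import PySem

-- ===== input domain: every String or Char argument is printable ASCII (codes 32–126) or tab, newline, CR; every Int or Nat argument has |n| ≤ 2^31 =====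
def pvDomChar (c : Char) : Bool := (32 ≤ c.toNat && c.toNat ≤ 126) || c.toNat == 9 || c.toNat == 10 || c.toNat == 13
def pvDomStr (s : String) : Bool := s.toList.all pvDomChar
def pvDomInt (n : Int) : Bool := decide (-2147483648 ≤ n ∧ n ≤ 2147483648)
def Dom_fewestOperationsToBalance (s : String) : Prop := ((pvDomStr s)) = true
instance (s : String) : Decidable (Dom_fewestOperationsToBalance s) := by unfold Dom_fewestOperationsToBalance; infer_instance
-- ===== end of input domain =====

-- B replaces A's explicit character stack by a one-pass O(1)-state scan (open counter reset at blockers + two flags); same value, same O(n) cost.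

-- ===== PORT A =====
-- one loop step of A: push c unless the stack top is '(' and c is ')', then pop
def pvStepA (t : List Char) (c : Char) : List Char :=
  if t.length = 0 ∨ ¬(t.getLast? = some '(' ∧ c = ')') then t ++ [c] else t.dropLast

def fewestOperationsToBalance (s : String) : Int :=
  let t := s.toList.foldl pvStepA []
  let a : Int := t.count '('
  let b : Int := t.count ')'
  min a 1 + min b 1

-- ===== PORT B =====
-- one loop step of B over the state (has_open, has_close, open_cnt)
def pvStepB (st : Bool × Bool × Int) (c : Char) : Bool × Bool × Int :=
  if c = '(' then (st.1, st.2.1, st.2.2 + 1)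
  else if c = ')' then
    (if st.2.2 > 0 then (st.1, st.2.1, st.2.2 - 1) else (st.1, true, st.2.2))
  else ((if st.2.2 > 0 then true else st.1), st.2.1, 0)

def fewestOperationsToBalance_alt (s : String) : Int :=
  let r := s.toList.foldl pvStepB (false, false, 0)
  (if r.1 = true ∨ r.2.2 > 0 then 1 else 0) + (if r.2.1 = true then 1 else 0)

-- ===== PRECONDITION & SPEC =====
def Spec_fewestOperationsToBalance (s : String) (out : Int) : Prop := out = fewestOperationsToBalance_alt s
instance (s : String) (out : Int) : Decidable (Spec_fewestOperationsToBalance s out) := by unfold Spec_fewestOperationsToBalance; infer_instance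

-- ===== CLAIM (what is proved, stated in full; the proofs are below) =====
def Claim_equal_fewestOperationsToBalance : Prop := ∀ (s : String), Dom_fewestOperationsToBalance s → Spec_fewestOperationsToBalance s (fewestOperationsToBalance s)

-- ===== LEMMAS AND PROOFS =====

-- Invariant: A's stack is u ++ replicate oc '(' where u does not end in '(',
-- B's flags record whether u contains '(' resp. ')'.
theorem pv_key (cs : List Char) : ∀ (u : List Char) (ho hc : Bool) (oc : Int),
    0 ≤ oc → u.getLast? ≠ some '(' →
    ho = decide (0 < u.count '(') → hc = decide (0 < u.count ')') →
    ∃ u' : List Char,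
      cs.foldl pvStepA (u ++ List.replicate oc.toNat '(') =
        u' ++ List.replicate ((cs.foldl pvStepB (ho, hc, oc)).2.2).toNat '(' ∧
      0 ≤ (cs.foldl pvStepB (ho, hc, oc)).2.2 ∧
      u'.getLast? ≠ some '(' ∧
      (cs.foldl pvStepB (ho, hc, oc)).1 = decide (0 < u'.count '(') ∧
      (cs.foldl pvStepB (ho, hc, oc)).2.1 = decide (0 < u'.count ')') := by
  induction cs with
  | nil =>
    intro u ho hc oc hoc hlast hho hhc
    exact ⟨u, rfl, hoc, hlast, hho, hhc⟩
  | cons c cs ih =>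
    intro u ho hc oc hoc hlast hho hhc
    simp only [List.foldl_cons]
    by_cases h1 : c = '('
    · subst h1
      have hA : pvStepA (u ++ List.replicate oc.toNat '(') '(' =
          u ++ List.replicate (oc + 1).toNat '(' := by
        have : (oc + 1).toNat = oc.toNat + 1 := by omega
        simp [pvStepA, this, List.replicate_succ' (n := oc.toNat)]
      have hB : pvStepB (ho, hc, oc) '(' = (ho, hc, oc + 1) := by
        simp [pvStepB]
      rw [hA, hB]
      exact ih u ho hc (oc + 1) (by omega) hlast hho hhc
    · by_cases h2 : c = ')'
      · subst h2
        by_cases h3 : 0 < oc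
        · -- pop: stack top is '('
          obtain ⟨k, hk⟩ : ∃ k, oc.toNat = k + 1 := ⟨oc.toNat - 1, by omega⟩
          have hA : pvStepA (u ++ List.replicate oc.toNat '(') ')' =
              u ++ List.replicate (oc - 1).toNat '(' := by
            have hk' : (oc - 1).toNat = k := by omega
            simp [pvStepA, hk, hk', List.replicate_succ' (n := k),
              ← List.append_assoc]
          have hB : pvStepB (ho, hc, oc) ')' = (ho, hc, oc - 1) := by
            simp [pvStepB, h3]
          rw [hA, hB]
          exact ih u ho hc (oc - 1) (by omega) hlast hho hhc
        · -- oc = 0: push ')'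
          have hoc0 : oc = 0 := by omega
          subst hoc0
          have hA : pvStepA (u ++ List.replicate (0:Int).toNat '(') ')' =
              (u ++ [')']) ++ List.replicate (0:Int).toNat '(' := by
            simp [pvStepA, hlast]
          have hB : pvStepB (ho, hc, 0) ')' = (ho, true, 0) := by
            simp [pvStepB]
          rw [hA, hB]
          refine ih (u ++ [')']) ho true 0 le_rfl (by simp) ?_ ?_
          · simpa [List.count_append] using hho
          · simp [List.count_append]
      · -- blocker: push c, reset counter
        have hA : pvStepA (u ++ List.replicate oc.toNat '(') c =
            ((u ++ List.replicate oc.toNat '(') ++ [c]) ++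
              List.replicate (0:Int).toNat '(' := by
          simp [pvStepA, h2]
        have hB : pvStepB (ho, hc, oc) c =
            ((if oc > 0 then true else ho), hc, 0) := by
          simp [pvStepB, h1, h2]
        rw [hA, hB]
        have h1' : '(' ≠ c := fun h => h1 h.symm
        have h2' : ')' ≠ c := fun h => h2 h.symm
        refine ih ((u ++ List.replicate oc.toNat '(') ++ [c])
          (if oc > 0 then true else ho) hc 0 le_rfl (by simp [h1]) ?_ ?_
        · subst hho
          by_cases h4 : 0 < oc
          · have : 0 < oc.toNat := by omega
            simp [h4, List.count_append, h1', this]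
          · have : oc.toNat = 0 := by omega
            simp [h4, List.count_append, this, h1']
        · subst hhc
          simp [List.count_append, List.count_replicate, h2']

-- ===== VERDICT (by name: the statement is the Claim_ definition above) =====
theorem fewestOperationsToBalance_spec : Claim_equal_fewestOperationsToBalance := by
  intro s _
  unfold Spec_fewestOperationsToBalance fewestOperationsToBalance fewestOperationsToBalance_alt
  obtain ⟨u', heq, hnn, -, hho, hhc⟩ :=
    pv_key s.toList [] false false 0 le_rfl (by simp) (by simp) (by simp)
  rcases hr : s.toList.foldl pvStepB (false, false, 0) with ⟨ho', hc', oc'⟩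
  rw [hr] at heq hnn hho hhc
  simp only [List.nil_append, Int.toNat_zero, List.replicate_zero] at heq
  dsimp only
  rw [heq]
  have e1 : (u' ++ List.replicate oc'.toNat '(').count '(' = u'.count '(' + oc'.toNat := by
    simp [List.count_append]
  have e2 : (u' ++ List.replicate oc'.toNat '(').count ')' = u'.count ')' := by
    simp [List.count_append, List.count_replicate]
  simp only [e1, e2]
  subst hho; subst hhc
  simp only [decide_eq_true_eq]
  split_ifs <;> push_cast <;> omega
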